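-- pv_equiv track=rewrite | github.com/DyhanieMatkoy/LotusXMLEditor | xml_service.py | get_element_line_number
-- ===== SOURCE A (Python) =====
-- def get_element_line_number(xml_content: str, element_path: str) -> int:
--     """Get line number for specific XML element path"""
--     try:
--         lines = xml_content.split('\n')
--
--         # Simple path parsing - this could be more sophisticated
--         path_parts = element_path.split('/')
--         current_tag = path_parts[-1] if path_parts else ""
--
--         for i, line in enumerate(lines, 1):
--             if f"<{current_tag}" in line:
--                 return i
--
--         return -1
--
--     except Exception:
--         return -1
-- ===== SOURCE B (Python) =====
-- def get_element_line_number(xml_content: str, element_path: str) -> int: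
--     """Get line number for specific XML element path"""
--     try:
--         needle = "<" + element_path.split('/')[-1]
--         idx = xml_content.find(needle)
--         if idx == -1:
--             return -1
--         return xml_content[:idx].count('\n') + 1
--     except Exception:
--         return -1
-- ===== Notes on version B (the rewrite author's own statement) =====
-- stated objective: idiomatic
-- what changed: B drops the line split and the enumerate loop: one whole-string find of '<'+tag followed by a newline count over the prefix converts the match offset to a 1-based line number.
-- outside the precondition, e.g. on get_element_line_number('a<b\nc', 'b\nc'): A returns -1, B returns 1
import Mathlib
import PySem

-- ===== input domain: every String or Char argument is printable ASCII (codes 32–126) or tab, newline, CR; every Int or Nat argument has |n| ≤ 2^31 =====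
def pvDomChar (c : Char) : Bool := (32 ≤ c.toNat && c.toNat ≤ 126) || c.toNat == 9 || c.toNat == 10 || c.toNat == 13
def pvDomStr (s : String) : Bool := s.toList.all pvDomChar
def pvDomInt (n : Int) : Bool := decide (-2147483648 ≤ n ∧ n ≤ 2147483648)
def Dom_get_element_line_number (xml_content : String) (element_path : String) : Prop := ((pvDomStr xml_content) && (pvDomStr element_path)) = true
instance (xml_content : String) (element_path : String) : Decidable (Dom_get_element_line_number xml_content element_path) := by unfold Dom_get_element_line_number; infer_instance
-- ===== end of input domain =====

-- B replaces A's line split + enumerate loop by a single whole-string find of "<"+tag and a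
-- newline count over the prefix before the hit (idiomatic; same linear cost, no line list built).

-- ===== PORT A =====
-- the 'for i, line in enumerate(lines, 1): if f"<{current_tag}" in line: return i' loop
def pvLoopA (needle : List Char) : List (Int × List Char) → Int
  | [] => -1
  | (i, line) :: rest => if PySem.Chars.isIn needle line then i else pvLoopA needle rest

def get_element_line_number (xml_content : String) (element_path : String) : Int :=
  let lines := PySem.Chars.splitOn xml_content.toList ['\n']
  let path_parts := PySem.Chars.splitOn element_path.toList ['/']
  let current_tag := match PySem.List.pyGet? path_parts (-1) with   -- path_parts[-1] if path_parts else ""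
    | some t => t
    | none => []
  pvLoopA ('<' :: current_tag) (PySem.List.enumerate lines 1)

-- ===== PORT B =====
def get_element_line_number_alt (xml_content : String) (element_path : String) : Int :=
  let needle := '<' :: (PySem.List.pyGet? (PySem.Chars.splitOn element_path.toList ['/']) (-1)).getD []
  let idx := PySem.Chars.find xml_content.toList needle
  if idx = -1 then -1
  else (PySem.Chars.count (PySem.List.slice xml_content.toList none (some idx)) ['\n'] : Int) + 1

-- ===== PRECONDITION & SPEC =====
-- Pre_ excludes inputs whose element_path last '/'-segment contains a newline AND whose "<"+tag
-- occurs in xml_content: there A's line-wise search returns -1 (a multi-line needle never matches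
-- a single line) while B's whole-string search finds it — a degenerate corner (an XML tag name
-- cannot contain a newline) where either value is defensible.
def Pre_get_element_line_number (xml_content : String) (element_path : String) : Prop :=
  '\n' ∈ (PySem.List.pyGet? (PySem.Chars.splitOn element_path.toList ['/']) (-1)).getD [] →
    ¬ PySem.Chars.isIn
        ('<' :: (PySem.List.pyGet? (PySem.Chars.splitOn element_path.toList ['/']) (-1)).getD [])
        xml_content.toList = true
instance (xml_content : String) (element_path : String) : Decidable (Pre_get_element_line_number xml_content element_path) := by unfold Pre_get_element_line_number; infer_instance

def pvWitness_get_element_line_number : String × String := ("<a>\n<b>x</b>", "a/b")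

def Spec_get_element_line_number (xml_content : String) (element_path : String) (out : Int) : Prop := out = get_element_line_number_alt xml_content element_path
instance (xml_content : String) (element_path : String) (out : Int) : Decidable (Spec_get_element_line_number xml_content element_path out) := by unfold Spec_get_element_line_number; infer_instance

-- ===== CLAIM (what is proved, stated in full; the proofs are below) =====
def Claim_equal_get_element_line_number : Prop := ∀ (xml_content : String) (element_path : String), Dom_get_element_line_number xml_content element_path → Pre_get_element_line_number xml_content element_path → Spec_get_element_line_number xml_content element_path (get_element_line_number xml_content element_path)

-- ===== LEMMAS AND PROOFS =====

def pvSplitChar (c : Char) : List Char → List (List Char)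
  | [] => [[]]
  | a :: rest =>
      if a = c then [] :: pvSplitChar c rest
      else match pvSplitChar c rest with
        | [] => [[a]]
        | h :: t => (a :: h) :: t

lemma pvSplitChar_of_not_mem (c : Char) (s : List Char) (h : c ∉ s) :
    pvSplitChar c s = [s] := by
  induction s with
  | nil => simp [pvSplitChar]
  | cons a rest ih =>
    simp only [List.mem_cons, not_or] at h
    rw [pvSplitChar, if_neg (Ne.symm h.1), ih h.2]

lemma pvSplitChar_append (c : Char) (l t : List Char) (h : c ∉ l) :
    pvSplitChar c (l ++ c :: t) = l :: pvSplitChar c t := by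
  induction l with
  | nil => simp [pvSplitChar]
  | cons a rest ih =>
    simp only [List.mem_cons, not_or] at h
    rw [List.cons_append, pvSplitChar, if_neg (Ne.symm h.1), ih h.2]

lemma prefix_append_cons_iff (sub a t : List Char) (c : Char) (hc : c ∉ sub) :
    sub <+: a ++ c :: t ↔ sub <+: a := by
  constructor
  · intro hp
    induction sub generalizing a with
    | nil => simp
    | cons x xs ih =>
      cases a with
      | nil =>
        exfalso
        simp only [List.nil_append] at hp
        obtain ⟨r, hr⟩ := hp
        simp only [List.cons_append] at hr
        injection hr with h1 _
        exact hc (by simp [h1])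
      | cons y ys =>
        simp only [List.cons_append, List.cons_prefix_cons] at hp ⊢
        exact ⟨hp.1, ih ys (fun hm => hc (List.mem_cons_of_mem _ hm)) hp.2⟩
  · intro hp
    exact hp.trans (List.prefix_append _ _)

lemma find_eq_of_first (s sub : List Char) (n : Nat)
    (h1 : sub <+: s.drop n) (h2 : ∀ i < n, ¬ sub <+: s.drop i) :
    PySem.Chars.find s sub = n := by
  have hinf : sub <:+: s := by
    have := (PySem.Chars.exists_prefix_drop_iff_isIn (s := s) (sub := sub)).mp ⟨n, h1⟩
    rwa [PySem.Chars.isIn_iff_infix] at this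
  have hpos : 0 ≤ PySem.Chars.find s sub := (PySem.Chars.find_nonneg_iff s sub).mpr hinf
  obtain ⟨hp, hmin⟩ := PySem.Chars.find_spec hpos
  have : (PySem.Chars.find s sub).toNat = n := by
    rcases Nat.lt_trichotomy (PySem.Chars.find s sub).toNat n with h | h | h
    · exact absurd hp (h2 _ h)
    · exact h
    · exact absurd h1 (hmin n h)
  omega

theorem pvHeadDrop (p : Char → Bool) (s : List Char) (d : Char) (t : List Char)
    (h : List.dropWhile p s = d :: t) : p d = false := by
  induction s with
  | nil => simp at h
  | cons a s ih =>
    rw [List.dropWhile_cons] at h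
    by_cases hpa : p a
    · rw [if_pos hpa] at h; exact ih h
    · rw [if_neg hpa] at h
      injection h with h1 _
      subst h1
      simpa using hpa


lemma pvMain (needle : List Char) (hn : '\n' ∉ needle) :
    ∀ (s : List Char) (k : Int),
      pvLoopA needle (PySem.List.enumerate (pvSplitChar '\n' s) k)
        = if PySem.Chars.find s needle = -1 then -1
          else k + ((s.take (PySem.Chars.find s needle).toNat).count '\n' : Int) := by
  intro s
  induction hlen : s.length using Nat.strong_induction_on generalizing s with
  | _ N ih =>
  intro k
  by_cases hmem : '\n' ∈ s
  case neg =>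
    -- s is a single line
    rw [pvSplitChar_of_not_mem _ _ hmem, PySem.List.enumerate_cons, PySem.List.enumerate_nil]
    rw [pvLoopA]
    by_cases hin : PySem.Chars.isIn needle s = true
    · rw [if_pos hin]
      have hpos : 0 ≤ PySem.Chars.find s needle := by
        rw [PySem.Chars.find_nonneg_iff, ← PySem.Chars.isIn_iff_infix]; exact hin
      rw [if_neg (by omega)]
      have : (s.take (PySem.Chars.find s needle).toNat).count '\n' = 0 := by
        rw [List.count_eq_zero]
        exact fun hc => hmem (List.mem_of_mem_take hc)
      rw [this]; simp
    · rw [if_neg (by simpa using hin), show pvLoopA needle [] = -1 from rfl]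
      rw [if_pos]
      rw [PySem.Chars.find_eq_neg_one_iff, ← PySem.Chars.isIn_iff_infix]
      simpa using hin
  case pos =>
    -- s = l ++ '\n' :: t, '\n' ∉ l
    set p : Char → Bool := fun c => c != '\n' with hp
    set l := s.takeWhile p with hldef
    have hdne : s.dropWhile p ≠ [] := by
      rw [Ne, List.dropWhile_eq_nil_iff]
      intro hall
      have := hall '\n' hmem
      simp [hp] at this
    obtain ⟨d, t, hdt⟩ := List.exists_cons_of_ne_nil hdne
    have hd : d = '\n' := by
      have := pvHeadDrop p s d t hdt
      simpa [hp] using this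
    subst hd
    have hs : s = l ++ '\n' :: t := by
      conv_lhs => rw [← List.takeWhile_append_dropWhile (p := p) (l := s)]
      rw [hdt]
    have hlnot : '\n' ∉ l := by
      intro hc
      have := List.mem_takeWhile_imp hc
      simp [hp] at this
    have hlt : t.length < N := by
      have : s.length = l.length + 1 + t.length := by rw [hs]; simp; omega
      omega
    -- no occurrence of needle inside l ⊕ first occurrence inside l
    rw [hs, pvSplitChar_append _ _ _ hlnot, PySem.List.enumerate_cons, pvLoopA]
    by_cases hin : PySem.Chars.isIn needle l = true
    · rw [if_pos hin]
      have hposl : 0 ≤ PySem.Chars.find l needle := by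
        rw [PySem.Chars.find_nonneg_iff, ← PySem.Chars.isIn_iff_infix]; exact hin
      obtain ⟨hpf, hminl⟩ := PySem.Chars.find_spec hposl
      set n := (PySem.Chars.find l needle).toNat with hndef
      have hnle : n ≤ l.length := by
        have := PySem.Chars.find_le_length l needle
        omega
      have hfind : PySem.Chars.find (l ++ '\n' :: t) needle = n := by
        apply find_eq_of_first
        · rw [List.drop_append, Nat.sub_eq_zero_of_le hnle, List.drop_zero,
            prefix_append_cons_iff _ _ _ _ hn]
          exact hpf
        · intro i hi
          rw [List.drop_append, Nat.sub_eq_zero_of_le (by omega), List.drop_zero,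
            prefix_append_cons_iff _ _ _ _ hn]
          exact hminl i hi
      rw [hfind, if_neg (by omega)]
      have htake : (l ++ '\n' :: t).take ((n : Int)).toNat = l.take n := by
        rw [Int.toNat_natCast, List.take_append, Nat.sub_eq_zero_of_le hnle, List.take_zero, List.append_nil]
      rw [htake]
      have : (l.take n).count '\n' = 0 := by
        rw [List.count_eq_zero]
        exact fun hc => hlnot (List.mem_of_mem_take hc)
      rw [this]; simp
    · rw [if_neg (by simpa using hin)]
      rw [ih t.length hlt t rfl (k + 1)]
      have hnol : ∀ j, ¬ needle <+: l.drop j := by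
        intro j hj
        have : PySem.Chars.isIn needle l = true :=
          (PySem.Chars.exists_prefix_drop_iff_isIn needle l).mp ⟨j, hj⟩
        exact hin this
      have hnos : ∀ i ≤ l.length, ¬ needle <+: (l ++ '\n' :: t).drop i := by
        intro i hi
        rw [List.drop_append, Nat.sub_eq_zero_of_le hi, List.drop_zero,
          prefix_append_cons_iff _ _ _ _ hn]
        exact hnol i
      by_cases hft : PySem.Chars.find t needle = -1
      · have hfs : PySem.Chars.find (l ++ '\n' :: t) needle = -1 := by
          rw [PySem.Chars.find_eq_neg_one_iff] at hft ⊢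
          intro hinf
          obtain ⟨i, hi⟩ := (PySem.Chars.exists_prefix_drop_iff_isIn needle (l ++ '\n' :: t)).mpr
            (by rwa [PySem.Chars.isIn_iff_infix])
          by_cases hil : i ≤ l.length
          · exact hnos i hil hi
          · apply hft
            rw [← PySem.Chars.isIn_iff_infix, ← PySem.Chars.exists_prefix_drop_iff_isIn]
            rw [List.drop_append, List.drop_eq_nil_of_le (by omega), List.nil_append] at hi
            obtain ⟨j, hj⟩ : ∃ j, i - l.length = j + 1 := ⟨i - l.length - 1, by omega⟩
            rw [hj, List.drop_succ_cons] at hi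
            exact ⟨j, hi⟩
        rw [hft, hfs]
        simp
      · rw [if_neg hft]
        have hposT : 0 ≤ PySem.Chars.find t needle := by
          have := PySem.Chars.neg_one_le_find t needle
          omega
        obtain ⟨hpf, hminT⟩ := PySem.Chars.find_spec hposT
        set m := (PySem.Chars.find t needle).toNat with hmdef
        have hfind : PySem.Chars.find (l ++ '\n' :: t) needle = (l.length + 1 + m : Nat) := by
          apply find_eq_of_first
          · rw [List.drop_append, List.drop_eq_nil_of_le (by omega), List.nil_append]
            have h2 : l.length + 1 + m - l.length = m + 1 := by omega
            rw [h2, List.drop_succ_cons]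
            exact hpf
          · intro i hi
            by_cases hil : i ≤ l.length
            · exact hnos i hil
            · rw [List.drop_append, List.drop_eq_nil_of_le (by omega), List.nil_append]
              obtain ⟨j, hj⟩ : ∃ j, i - l.length = j + 1 := ⟨i - l.length - 1, by omega⟩
              rw [hj, List.drop_succ_cons]
              exact hminT j (by omega)
        rw [hfind, if_neg (by push_cast; omega)]
        have htake : (l ++ '\n' :: t).take ((l.length + 1 + m : Nat) : Int).toNat
            = l ++ '\n' :: t.take m := by
          rw [Int.toNat_natCast, List.take_append, List.take_of_length_le (by omega)]
          have h2 : l.length + 1 + m - l.length = m + 1 := by omega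
          rw [h2, List.take_succ_cons]
        rw [htake]
        have hcnt : (l ++ '\n' :: t.take m).count '\n'
            = (t.take m).count '\n' + 1 := by
          rw [List.count_append, List.count_cons]
          rw [List.count_eq_zero.mpr hlnot]
          simp
        rw [hcnt, hmdef]
        push_cast
        ring

def pvConsHead (p : List Char) : List (List Char) → List (List Char)
  | [] => [p]
  | h :: t => (p ++ h) :: t

lemma pvSplitChar_ne_nil (c : Char) (s : List Char) : pvSplitChar c s ≠ [] := by
  cases s with
  | nil => simp [pvSplitChar]
  | cons a rest =>
    simp only [pvSplitChar]
    split_ifs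
    · simp
    · split <;> simp

lemma splitOn_go_eq (c : Char) :
    ∀ (fuel : Nat) (l cur : List Char) (acc : List (List Char)), l.length < fuel →
      PySem.Chars.splitOn.go [c] fuel l cur acc
        = acc.reverse ++ pvConsHead cur.reverse (pvSplitChar c l) := by
  intro fuel
  induction fuel with
  | zero => intro l cur acc h; omega
  | succ f ih =>
    intro l cur acc h
    cases l with
    | nil =>
      show (cur.reverse :: acc).reverse = _
      simp [pvSplitChar, pvConsHead]
    | cons a rest =>
      simp only [List.length_cons] at h
      show (if List.isPrefixOf [c] (a :: rest) then
              PySem.Chars.splitOn.go [c] f (List.drop [c].length (a :: rest)) [] (cur.reverse :: acc)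
            else PySem.Chars.splitOn.go [c] f rest (a :: cur) acc) = _
      obtain ⟨h0, t0, hm⟩ := List.exists_cons_of_ne_nil (pvSplitChar_ne_nil c rest)
      by_cases hac : a = c
      · rw [if_pos (by simp [List.isPrefixOf, hac])]
        simp only [List.length_cons, List.length_nil, List.drop_succ_cons, List.drop_zero]
        rw [ih rest [] (cur.reverse :: acc) (by omega)]
        rw [pvSplitChar, if_pos hac, hm]
        simp [pvConsHead]
      · rw [if_neg (by simp [List.isPrefixOf, beq_iff_eq]; exact fun hh => hac hh.symm)]
        rw [ih rest (a :: cur) acc (by omega)]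
        rw [pvSplitChar, if_neg hac, hm]
        simp [pvConsHead]

lemma splitOn_eq_pvSplitChar (c : Char) (s : List Char) :
    PySem.Chars.splitOn s [c] = pvSplitChar c s := by
  show PySem.Chars.splitOn.go [c] (s.length + 1) s [] [] = _
  rw [splitOn_go_eq c (s.length + 1) s [] [] (by omega)]
  obtain ⟨h0, t0, hm⟩ := List.exists_cons_of_ne_nil (pvSplitChar_ne_nil c s)
  rw [hm]; simp [pvConsHead]

lemma count_single_char (c : Char) (s : List Char) :
    PySem.Chars.count s [c] = s.count c := by
  show (if ([c] : List Char).isEmpty then s.length + 1 else PySem.Chars.count.go [c] s.length s 0) = _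
  rw [if_neg (by simp)]
  suffices h : ∀ (fuel : Nat) (l : List Char) (acc : Nat), l.length ≤ fuel →
      PySem.Chars.count.go [c] fuel l acc = acc + l.count c by
    simpa using h s.length s 0 le_rfl
  intro fuel
  induction fuel with
  | zero => intro l acc h; rw [List.length_eq_zero_iff.mp (Nat.le_zero.mp h)]; rfl
  | succ f ih =>
    intro l acc h
    cases l with
    | nil => rfl
    | cons a rest =>
      simp only [List.length_cons] at h
      rw [PySem.Chars.count.go]
      by_cases hac : c = a
      · subst hac
        rw [if_pos (by simp [List.isPrefixOf])]
        simp only [List.length_cons, List.length_nil, List.drop_succ_cons, List.drop_zero]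
        rw [ih rest (acc+1) (by omega)]
        simp
        omega
      · rw [if_neg (by simp [List.isPrefixOf, beq_iff_eq, hac])]
        rw [ih rest acc (by omega)]
        simp [Ne.symm hac]

lemma pvLoopA_none (needle : List Char) (lst : List (Int × List Char))
    (h : ∀ pr ∈ lst, PySem.Chars.isIn needle pr.2 = false) :
    pvLoopA needle lst = -1 := by
  induction lst with
  | nil => rfl
  | cons pr rest ih =>
    obtain ⟨i, line⟩ := pr
    rw [pvLoopA, h (i, line) List.mem_cons_self, if_neg (by simp)]
    exact ih fun q hq => h q (List.mem_cons_of_mem _ hq)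

lemma pvSplitChar_head_tail (c : Char) (s : List Char) :
    ∃ h t, pvSplitChar c s = h :: t ∧ h <+: s ∧ ∀ x ∈ t, x <:+: s := by
  induction s with
  | nil => exact ⟨[], [], rfl, List.nil_prefix, by simp⟩
  | cons a rest ih =>
    obtain ⟨h, t, hm, hpre, htail⟩ := ih
    by_cases hac : a = c
    · refine ⟨[], pvSplitChar c rest, by rw [pvSplitChar, if_pos hac], List.nil_prefix, ?_⟩
      intro x hx
      rw [hm] at hx
      rcases List.mem_cons.mp hx with rfl | hx
      · exact hpre.isInfix.trans (List.infix_cons_iff.mpr (Or.inr (List.infix_refl _)))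
      · exact (htail x hx).trans (List.infix_cons_iff.mpr (Or.inr (List.infix_refl _)))
    · refine ⟨a :: h, t, by rw [pvSplitChar, if_neg hac, hm], List.cons_prefix_cons.mpr ⟨rfl, hpre⟩, ?_⟩
      intro x hx
      exact (htail x hx).trans (List.infix_cons_iff.mpr (Or.inr (List.infix_refl _)))

lemma mem_pvSplitChar_infix (c : Char) (s l : List Char) (h : l ∈ pvSplitChar c s) :
    l <:+: s := by
  obtain ⟨h0, t0, hm, hpre, htail⟩ := pvSplitChar_head_tail c s
  rw [hm] at h
  rcases List.mem_cons.mp h with rfl | h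
  · exact hpre.isInfix
  · exact htail l h

-- ===== VERDICT (by name: the statement is the Claim_ definition above) =====
theorem get_element_line_number_spec : Claim_equal_get_element_line_number := by
  unfold Claim_equal_get_element_line_number
  intro xml path _ hpre
  unfold Spec_get_element_line_number get_element_line_number get_element_line_number_alt
  unfold Pre_get_element_line_number at hpre
  dsimp only
  have htag : (match PySem.List.pyGet? (PySem.Chars.splitOn path.toList ['/']) (-1) with
      | some t => t
      | none => ([] : List Char))
      = (PySem.List.pyGet? (PySem.Chars.splitOn path.toList ['/']) (-1)).getD [] := by
    cases PySem.List.pyGet? (PySem.Chars.splitOn path.toList ['/']) (-1) <;> rfl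
  rw [htag]
  set tag := (PySem.List.pyGet? (PySem.Chars.splitOn path.toList ['/']) (-1)).getD [] with htagdef
  by_cases hnl : '\n' ∈ tag
  · -- multi-line needle: A's loop never matches a line, and Pre_ says it is not in xml either
    have hnotin : ¬ PySem.Chars.isIn ('<' :: tag) xml.toList = true := hpre hnl
    have hninf : ¬ ('<' :: tag) <:+: xml.toList := by
      rwa [PySem.Chars.isIn_iff_infix] at hnotin
    rw [if_pos (by rwa [PySem.Chars.find_eq_neg_one_iff])]
    apply pvLoopA_none
    intro pr hpr
    have hline : pr.2 ∈ PySem.Chars.splitOn xml.toList ['\n'] := by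
      have := List.mem_map_of_mem (f := fun q : Int × List Char => q.2) hpr
      rwa [PySem.List.map_snd_enumerate] at this
    rw [splitOn_eq_pvSplitChar] at hline
    rw [PySem.Chars.isIn_eq_false_iff]
    intro hinf
    exact hninf (hinf.trans (mem_pvSplitChar_infix '\n' xml.toList pr.2 hline))
  · -- single-line needle: line-wise first match = whole-string find + newline count
    rw [splitOn_eq_pvSplitChar, pvMain ('<' :: tag) (by simp [hnl]) xml.toList 1]
    by_cases hf : PySem.Chars.find xml.toList ('<' :: tag) = -1
    · rw [if_pos hf, if_pos hf]
    · rw [if_neg hf, if_neg hf]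
      have hpos : 0 ≤ PySem.Chars.find xml.toList ('<' :: tag) := by
        have := PySem.Chars.neg_one_le_find xml.toList ('<' :: tag)
        omega
      rw [PySem.List.slice_to _ hpos, count_single_char]
      omega
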